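-- pv_equiv track=rewrite | github.com/aaaamy-wy/cs61a | projects/typing_test/typing_test.py | swap_score
-- ===== SOURCE A (Python) =====
-- def swap_score(word1, word2):
--     """
--     >>> swap_score("nice", "rice")  # Substitute n to r
--     1
--     >>> swap_score("range", "rungs")  # Substitute a to u, e to s
--     2
--     >>> swap_score("pill", "pillage")  # Don't substitute anything
--     0
--     >>> swap_score("byte", "bit")  # Substitute y to i
--     1
--     """
--     if word1 == word2:
--         return 0
--     elif not word1 or not word2:
--         return 0
--     elif word1[0] == word2[0]:
--         return swap_score(word1[1:], word2[1:])
--     else: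
--         return 1 + swap_score(word1[1:], word2[1:])
-- ===== SOURCE B (Python) =====
-- def swap_score(word1, word2):
--     count = 0
--     for a, b in zip(word1, word2):
--         if a != b:
--             count += 1
--     return count
-- ===== Notes on version B (the rewrite author's own statement) =====
-- stated objective: simpler
-- what changed: Replaced A's O(n^2) recursion on string slices (word[1:] copies each step) with a flat iterative loop over zip(word1, word2) that increments a counter on mismatched pairs.
import Mathlib
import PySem

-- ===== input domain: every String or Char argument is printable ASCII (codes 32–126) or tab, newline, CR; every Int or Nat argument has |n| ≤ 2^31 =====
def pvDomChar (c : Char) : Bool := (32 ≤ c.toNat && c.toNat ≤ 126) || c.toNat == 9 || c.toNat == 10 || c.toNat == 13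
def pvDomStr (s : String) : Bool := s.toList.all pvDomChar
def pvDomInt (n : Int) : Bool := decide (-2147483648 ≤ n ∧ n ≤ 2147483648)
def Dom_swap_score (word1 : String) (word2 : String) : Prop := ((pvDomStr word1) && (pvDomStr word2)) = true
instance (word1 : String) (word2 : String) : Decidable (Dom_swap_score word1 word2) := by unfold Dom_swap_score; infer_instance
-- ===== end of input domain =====

-- B replaces A's recursion on string slices by a single iterative counting loop over zip (simpler, linear).

-- ===== PORT A =====
-- A's recursion, step for step, on the character lists: equal-string shortcut, empty checks,
-- then compare heads and recurse on the tails (word[1:]).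
def swapScoreA : List Char → List Char → Int
  | w1, w2 =>
    if w1 = w2 then 0
    else match w1, w2 with
      | [], _ => 0
      | _, [] => 0
      | a :: t1, b :: t2 => if a = b then swapScoreA t1 t2 else 1 + swapScoreA t1 t2

def swap_score (word1 : String) (word2 : String) : Int :=
  swapScoreA word1.toList word2.toList

-- ===== PORT B =====
-- Source B: counter starts at 0; a flat loop over zip(word1, word2) adds one per differing pair.
def swap_score_alt (word1 : String) (word2 : String) : Int :=
  (word1.toList.zip word2.toList).foldl
    (fun count p => if p.1 ≠ p.2 then count + 1 else count) 0

-- ===== PRECONDITION & SPEC =====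
def Spec_swap_score (word1 : String) (word2 : String) (out : Int) : Prop := out = swap_score_alt word1 word2
instance (word1 : String) (word2 : String) (out : Int) : Decidable (Spec_swap_score word1 word2 out) := by unfold Spec_swap_score; infer_instance

-- ===== CLAIM (what is proved, stated in full; the proofs are below) =====
def Claim_equal_swap_score : Prop := ∀ (word1 : String) (word2 : String), Dom_swap_score word1 word2 → Spec_swap_score word1 word2 (swap_score word1 word2)

-- ===== LEMMAS AND PROOFS =====

theorem foldl_count_shift (zs : List (Char × Char)) (c : Int) :
    zs.foldl (fun count p => if p.1 ≠ p.2 then count + 1 else count) c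
      = c + zs.foldl (fun count p => if p.1 ≠ p.2 then count + 1 else count) 0 := by
  induction zs generalizing c with
  | nil => simp
  | cons z t ih =>
    simp only [List.foldl_cons]
    rw [ih, ih (if z.1 ≠ z.2 then (0:Int) + 1 else 0)]
    split <;> ring

theorem swapScoreA_eq (w1 w2 : List Char) :
    swapScoreA w1 w2
      = (w1.zip w2).foldl (fun count p => if p.1 ≠ p.2 then count + 1 else count) 0 := by
  induction w1 generalizing w2 with
  | nil => rw [swapScoreA]; simp
  | cons a t1 ih =>
    cases w2 with
    | nil => simp [swapScoreA]
    | cons b t2 =>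
      rw [swapScoreA]
      by_cases heq : (a :: t1 : List Char) = b :: t2
      · obtain ⟨rfl, rfl⟩ := by simpa using heq
        simp only [List.zip_cons_cons, List.foldl_cons, ne_eq, not_true_eq_false, if_false]
        rw [foldl_count_shift, ← ih]
        -- swapScoreA t1 t1 = 0 by induction on t1
        clear ih heq
        induction t1 with
        | nil => rw [swapScoreA]; simp
        | cons c t ihh => rw [swapScoreA]; simp
      · rw [if_neg heq]
        simp only [List.zip_cons_cons, List.foldl_cons]
        rw [foldl_count_shift, ← ih]
        by_cases hab : a = b
        · subst hab; simp
        · simp [hab]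

-- ===== VERDICT (by name: the statement is the Claim_ definition above) =====
theorem swap_score_spec : Claim_equal_swap_score := by
  intro w1 w2 _
  unfold Spec_swap_score swap_score swap_score_alt
  exact swapScoreA_eq _ _
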